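-- pv_equiv track=rewrite | github.com/ssudev/programmers | mock_test.py | solution
-- ===== SOURCE A (Python) =====
-- def solution(answers):
--     answer = []
--     dic = [0,0,0]
--     answer_1 = [1,2,3,4,5]
--     answer_2 = [2,1,2,3,2,4,2,5]
--     answer_3 = [3,3,1,1,2,2,4,4,5,5]
--
--     1,2,3,4,5,6,7,8,9,10
--
--     for i in range(len(answers)):
--
--         index = i%5
--         if answers[i] == answer_1[index]:
--             dic[0] += 1
--
--         index = i%8
--         if answers[i] == answer_2[index]:
--             dic[1] += 1
--
--         index = i%10
--         if answers[i] == answer_3[index]: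
--             dic[2] += 1
--
--     for i in range(len(dic)):
--         if max(dic) == dic[i]:
--             answer.append(i+1)
--
--
--     return answer
-- ===== SOURCE B (Python) =====
-- def solution(answers):
--     # Build a histogram keyed by (position mod 40, answer value); 40 = lcm(5, 8, 10),
--     # so a pattern's score is read off the histogram without re-scanning the answers.
--     hist = {}
--     for i, a in enumerate(answers):
--         key = (i % 40, a)
--         hist[key] = hist.get(key, 0) + 1
--     patterns = [[1, 2, 3, 4, 5], [2, 1, 2, 3, 2, 4, 2, 5], [3, 3, 1, 1, 2, 2, 4, 4, 5, 5]]
--     scores = [sum(hist.get((r, pat[r % len(pat)]), 0) for r in range(40)) for pat in patterns]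
--     best = max(scores)
--     return [k for k, s in enumerate(scores, 1) if s == best]
-- ===== Notes on version B (the rewrite author's own statement) =====
-- stated objective: alternative
-- what changed: A compares each answer against all three patterns via per-element modular indexing; B never compares answers with patterns element-by-element: it builds one histogram keyed by (index mod 40, value) (40 = lcm of the period lengths) and then reads each pattern's score as 40 histogram lookups, picking the argmax from the score list.
import Mathlib
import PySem

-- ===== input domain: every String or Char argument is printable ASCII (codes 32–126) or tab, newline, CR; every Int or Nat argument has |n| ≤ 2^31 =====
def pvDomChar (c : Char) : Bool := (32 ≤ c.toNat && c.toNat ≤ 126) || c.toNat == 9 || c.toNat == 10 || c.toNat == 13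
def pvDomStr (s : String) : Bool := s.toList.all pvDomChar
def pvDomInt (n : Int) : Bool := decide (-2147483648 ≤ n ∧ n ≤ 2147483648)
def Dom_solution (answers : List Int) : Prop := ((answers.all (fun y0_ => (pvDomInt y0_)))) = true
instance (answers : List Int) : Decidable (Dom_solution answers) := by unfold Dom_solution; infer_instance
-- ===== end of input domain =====

-- B replaces A's per-element comparison against three cyclic patterns by one histogram
-- keyed by (index mod 40, value) (40 = lcm of the periods) read back with 40 lookups per pattern (alternative).


-- ===== PORT A =====
def solution (answers : List Int) : List Int :=
  let answer_1 : List Int := [1,2,3,4,5]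
  let answer_2 : List Int := [2,1,2,3,2,4,2,5]
  let answer_3 : List Int := [3,3,1,1,2,2,4,4,5,5]
  -- dic = [0,0,0] kept as a triple; dic[k] += 1 updates the k-th component
  let dic := (PySem.List.pyRange 0 answers.length 1).foldl
    (fun (d : Int × Int × Int) i =>
      let d := if PySem.List.pyGetD answers i 0 == PySem.List.pyGetD answer_1 (PySem.Int.mod i 5) 0
               then (d.1 + 1, d.2.1, d.2.2) else d
      let d := if PySem.List.pyGetD answers i 0 == PySem.List.pyGetD answer_2 (PySem.Int.mod i 8) 0
               then (d.1, d.2.1 + 1, d.2.2) else d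
      if PySem.List.pyGetD answers i 0 == PySem.List.pyGetD answer_3 (PySem.Int.mod i 10) 0
      then (d.1, d.2.1, d.2.2 + 1) else d)
    (0, 0, 0)
  let dicL : List Int := [dic.1, dic.2.1, dic.2.2]
  (PySem.List.pyRange 0 3 1).foldl
    (fun ans i =>
      if ((PySem.List.max? dicL (fun x => x)).getD 0) == PySem.List.pyGetD dicL i 0
      then ans ++ [i + 1] else ans)
    []

-- ===== PORT B =====
def solution_alt (answers : List Int) : List Int :=
  -- hist[(i % 40, a)] += 1 over enumerate(answers)
  let hist := (PySem.List.enumerate answers 0).foldl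
    (fun (d : PySem.Dict (Int × Int) Int) p =>
      let key := (PySem.Int.mod p.1 40, p.2)
      d.insert key (d.getD key 0 + 1))
    PySem.Dict.empty
  let patterns : List (List Int) := [[1,2,3,4,5],[2,1,2,3,2,4,2,5],[3,3,1,1,2,2,4,4,5,5]]
  let scores := patterns.map (fun pat =>
    (PySem.List.pyRange 0 40 1).foldl
      (fun s r => s + hist.getD (r, PySem.List.pyGetD pat (PySem.Int.mod r (pat.length : Int)) 0) 0) 0)
  let best := (PySem.List.max? scores (fun x => x)).getD 0
  (PySem.List.enumerate scores 1).filterMap (fun p => if p.2 == best then some p.1 else none)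

-- ===== PRECONDITION & SPEC =====
def Spec_solution (answers : List Int) (out : List Int) : Prop := out = solution_alt answers
instance (answers : List Int) (out : List Int) : Decidable (Spec_solution answers out) := by unfold Spec_solution; infer_instance

-- ===== CLAIM (what is proved, stated in full; the proofs are below) =====
def Claim_equal_solution : Prop := ∀ (answers : List Int), Dom_solution answers → Spec_solution answers (solution answers)

-- ===== LEMMAS AND PROOFS =====

-- reference count: matches of xs against pat starting at absolute position j
def cnt (pat : List Int) (j : Nat) : List Int → Int
  | [] => 0
  | a :: t => (if a == pat.getD (j % pat.length) 0 then 1 else 0) + cnt pat (j + 1) t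

-- the key list B's histogram is the counter of
def keysOf (xs : List Int) (j : Nat) : List (Int × Int) :=
  (PySem.List.enumerate xs (j : Int)).map (fun p => (PySem.Int.mod p.1 40, p.2))

lemma keysOf_nil (j : Nat) : keysOf [] j = [] := by
  simp [keysOf, PySem.List.enumerate_nil]

lemma keysOf_cons (a : Int) (t : List Int) (j : Nat) :
    keysOf (a :: t) j = (((j % 40 : Nat) : Int), a) :: keysOf t (j + 1) := by
  unfold keysOf
  rw [PySem.List.enumerate_cons]
  simp only [List.map_cons]
  have h1 : PySem.Int.mod (j : Int) 40 = ((j % 40 : Nat) : Int) := by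
    exact_mod_cast PySem.Int.mod_natCast j 40
  have h2 : ((j : Int) + 1) = ((j + 1 : Nat) : Int) := by push_cast; ring
  rw [h1, h2]

lemma sum_map_add (l : List Int) (f g : Int → Int) :
    (l.map (fun r => f r + g r)).sum = (l.map f).sum + (l.map g).sum := by
  induction l with
  | nil => simp
  | cons b t ih => simp [ih]; ring

lemma sum_map_if_count (l : List Int) (x : Int) (f : Int → Int) :
    (l.map (fun r => if r = x then f r else 0)).sum = (l.count x : Int) * f x := by
  induction l with
  | nil => simp
  | cons b t ih =>
    by_cases h : b = x
    · subst h
      simp [ih]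
      ring
    · simp [h, ih]

lemma score_eq (pat : List Int) (hne : pat ≠ []) (hdvd : pat.length ∣ 40)
    (xs : List Int) (j : Nat) :
    ((PySem.List.pyRange 0 40 1).map
      (fun r => (((keysOf xs j).count
        (r, PySem.List.pyGetD pat (PySem.Int.mod r (pat.length : Int)) 0) : Nat) : Int))).sum
      = cnt pat j xs := by
  induction xs generalizing j with
  | nil => simp [keysOf_nil, cnt]
  | cons a t ih =>
    rw [keysOf_cons]
    have hlen : 0 < pat.length := List.length_pos_iff.mpr hne
    have hmem : (((j % 40 : Nat) : Int)) ∈ PySem.List.pyRange 0 40 1 := by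
      rw [PySem.List.mem_pyRange_one]
      have := Nat.mod_lt j (show 0 < 40 by norm_num)
      omega
    have hnodup : (PySem.List.pyRange 0 40 1).Nodup := by decide
    have hcount1 : (PySem.List.pyRange 0 40 1).count (((j % 40 : Nat) : Int)) = 1 :=
      List.count_eq_one_of_mem hnodup hmem
    -- pointwise: count over the cons splits into the tail count plus a single-hit indicator
    have hpoint : ∀ r : Int,
        (((((j % 40 : Nat) : Int), a) :: keysOf t (j + 1)).count
          (r, PySem.List.pyGetD pat (PySem.Int.mod r (pat.length : Int)) 0) : Int)
        = ((keysOf t (j + 1)).count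
            (r, PySem.List.pyGetD pat (PySem.Int.mod r (pat.length : Int)) 0) : Int)
          + (if r = ((j % 40 : Nat) : Int)
             then (if a == PySem.List.pyGetD pat (PySem.Int.mod r (pat.length : Int)) 0 then 1 else 0)
             else 0) := by
      intro r
      by_cases hr : r = ((j % 40 : Nat) : Int)
      · subst hr
        by_cases ha : a = PySem.List.pyGetD pat (PySem.Int.mod ((j % 40 : Nat) : Int) (pat.length : Int)) 0
        · subst ha; simp
        · simp [List.count_cons, beq_iff_eq, Prod.ext_iff, ha]
      · have hr1 : ¬ (((j : Int)) % 40 = r) := by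
          intro h
          apply hr
          rw [← h]
          push_cast
          ring
        have hr2 : ¬ (r = ((j : Int)) % 40) := fun h => hr1 h.symm
        simp [hr1, hr2]
    have hmap : ((PySem.List.pyRange 0 40 1).map
        (fun r => (((((j % 40 : Nat) : Int), a) :: keysOf t (j + 1)).count
          (r, PySem.List.pyGetD pat (PySem.Int.mod r (pat.length : Int)) 0) : Int)))
        = (PySem.List.pyRange 0 40 1).map
          (fun r => ((keysOf t (j + 1)).count
              (r, PySem.List.pyGetD pat (PySem.Int.mod r (pat.length : Int)) 0) : Int)
            + (if r = ((j % 40 : Nat) : Int)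
               then (if a == PySem.List.pyGetD pat (PySem.Int.mod r (pat.length : Int)) 0 then 1 else 0)
               else 0)) :=
      List.map_congr_left (fun r _ => hpoint r)
    rw [hmap, sum_map_add, ih, sum_map_if_count, hcount1]
    -- evaluate the pattern value at the hit position
    have hpv : PySem.List.pyGetD pat (PySem.Int.mod ((j % 40 : Nat) : Int) (pat.length : Int)) 0
        = pat.getD (j % pat.length) 0 := by
      have h1 : PySem.Int.mod ((j % 40 : Nat) : Int) ((pat.length : Nat) : Int)
          = ((j % 40 % pat.length : Nat) : Int) := PySem.Int.mod_natCast (j % 40) pat.length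
      rw [h1, PySem.List.pyGetD_natCast, Nat.mod_mod_of_dvd j hdvd]
    rw [hpv]
    simp [cnt]
    ring

-- the A-side fold body, named for the proofs
def stepA (d : Int × Int × Int) (i : Int) (a : Int) : Int × Int × Int :=
  let d := if a == PySem.List.pyGetD ([1,2,3,4,5] : List Int) (PySem.Int.mod i 5) 0
           then (d.1 + 1, d.2.1, d.2.2) else d
  let d := if a == PySem.List.pyGetD ([2,1,2,3,2,4,2,5] : List Int) (PySem.Int.mod i 8) 0
           then (d.1, d.2.1 + 1, d.2.2) else d
  if a == PySem.List.pyGetD ([3,3,1,1,2,2,4,4,5,5] : List Int) (PySem.Int.mod i 10) 0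
  then (d.1, d.2.1, d.2.2 + 1) else d

lemma stepA_eval (d : Int × Int × Int) (j : Nat) (a : Int) :
    stepA d (j : Int) a =
      (d.1 + (if a == ([1,2,3,4,5] : List Int).getD (j % 5) 0 then 1 else 0),
       d.2.1 + (if a == ([2,1,2,3,2,4,2,5] : List Int).getD (j % 8) 0 then 1 else 0),
       d.2.2 + (if a == ([3,3,1,1,2,2,4,4,5,5] : List Int).getD (j % 10) 0 then 1 else 0)) := by
  have h5 : PySem.Int.mod (j : Int) 5 = ((j % 5 : Nat) : Int) := by
    exact_mod_cast PySem.Int.mod_natCast j 5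
  have h8 : PySem.Int.mod (j : Int) 8 = ((j % 8 : Nat) : Int) := by
    exact_mod_cast PySem.Int.mod_natCast j 8
  have h10 : PySem.Int.mod (j : Int) 10 = ((j % 10 : Nat) : Int) := by
    exact_mod_cast PySem.Int.mod_natCast j 10
  simp only [stepA, h5, h8, h10, PySem.List.pyGetD_natCast]
  split_ifs <;> simp

lemma foldA_enumerate (xs : List Int) (j : Nat) (d : Int × Int × Int) :
    (PySem.List.enumerate xs (j : Int)).foldl (fun s p => stepA s p.1 p.2) d =
      (d.1 + cnt [1,2,3,4,5] j xs,
       d.2.1 + cnt [2,1,2,3,2,4,2,5] j xs,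
       d.2.2 + cnt [3,3,1,1,2,2,4,4,5,5] j xs) := by
  induction xs generalizing j d with
  | nil => simp [PySem.List.enumerate_nil, cnt]
  | cons a t ih =>
    rw [PySem.List.enumerate_cons]
    simp only [List.foldl_cons]
    have hc : ((j : Int) + 1) = ((j + 1 : Nat) : Int) := by push_cast; ring
    rw [stepA_eval, hc, ih]
    simp [cnt]
    refine ⟨by ring, by ring, by ring⟩

lemma foldA_pyRange (xs : List Int) :
    (PySem.List.pyRange 0 (xs.length : Int) 1).foldl
      (fun (d : Int × Int × Int) i => stepA d i (PySem.List.pyGetD xs i 0)) (0,0,0) =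
      (cnt [1,2,3,4,5] 0 xs, cnt [2,1,2,3,2,4,2,5] 0 xs, cnt [3,3,1,1,2,2,4,4,5,5] 0 xs) := by
  have h2 := foldA_enumerate xs 0 (0,0,0)
  simp only [Nat.cast_zero] at h2
  rw [PySem.List.enumerate_eq_map_pyRange xs 0, List.foldl_map] at h2
  simpa using h2

-- B's histogram is the counter of keysOf, so each lookup is a count in that list
lemma hist_eq_counter (answers : List Int) :
    (PySem.List.enumerate answers 0).foldl
      (fun (d : PySem.Dict (Int × Int) Int) p =>
        let key := (PySem.Int.mod p.1 40, p.2)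
        d.insert key (d.getD key 0 + 1))
      PySem.Dict.empty
      = PySem.Dict.counter (keysOf answers 0) := by
  rw [← PySem.Dict.foldl_insert_getD_add_one_eq_counter]
  unfold keysOf
  rw [List.foldl_map]
  norm_num

-- a sum-accumulating foldl is the sum of the mapped list
lemma foldl_add_map (l : List Int) (f : Int → Int) (c : Int) :
    l.foldl (fun s r => s + f r) c = c + (l.map f).sum := by
  induction l generalizing c with
  | nil => simp
  | cons b t ih => simp [ih]; ring

-- the two final selection loops agree for any 3-element score list
lemma final_eq (x y z : Int) :
    (PySem.List.pyRange 0 3 1).foldl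
      (fun ans i =>
        if ((PySem.List.max? ([x,y,z] : List Int) (fun v => v)).getD 0) == PySem.List.pyGetD ([x,y,z] : List Int) i 0
        then ans ++ [i + 1] else ans) [] =
    (PySem.List.enumerate ([x,y,z] : List Int) 1).filterMap
      (fun p => if p.2 == ((PySem.List.max? ([x,y,z] : List Int) (fun v => v)).getD 0) then some p.1 else none) := by
  have hr : PySem.List.pyRange 0 3 1 = [0, 1, 2] := by decide
  rw [hr]
  simp only [PySem.List.max?_id_cons, Option.getD_some, List.foldl_cons, List.foldl_nil,
    PySem.List.enumerate_cons, PySem.List.enumerate_nil, List.filterMap_cons, List.filterMap_nil,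
    PySem.List.pyGetD_ofNat', List.getD, beq_iff_eq]
  norm_num
  split_ifs <;> first | rfl | (exfalso; omega)

-- ===== VERDICT (by name: the statement is the Claim_ definition above) =====
theorem solution_spec : Claim_equal_solution := by
  intro answers _
  show solution answers = solution_alt answers
  unfold solution solution_alt
  simp only []
  rw [show (fun (d : Int × Int × Int) (i : Int) =>
        let d := if PySem.List.pyGetD answers i 0 == PySem.List.pyGetD ([1,2,3,4,5] : List Int) (PySem.Int.mod i 5) 0
                 then (d.1 + 1, d.2.1, d.2.2) else d
        let d := if PySem.List.pyGetD answers i 0 == PySem.List.pyGetD ([2,1,2,3,2,4,2,5] : List Int) (PySem.Int.mod i 8) 0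
                 then (d.1, d.2.1 + 1, d.2.2) else d
        if PySem.List.pyGetD answers i 0 == PySem.List.pyGetD ([3,3,1,1,2,2,4,4,5,5] : List Int) (PySem.Int.mod i 10) 0
        then (d.1, d.2.1, d.2.2 + 1) else d)
      = fun d i => stepA d i (PySem.List.pyGetD answers i 0) from rfl]
  rw [foldA_pyRange, hist_eq_counter]
  have hscores : ([[1,2,3,4,5],[2,1,2,3,2,4,2,5],[3,3,1,1,2,2,4,4,5,5]] : List (List Int)).map
      (fun pat => (PySem.List.pyRange 0 40 1).foldl
        (fun s r => s + (PySem.Dict.counter (keysOf answers 0)).getD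
          (r, PySem.List.pyGetD pat (PySem.Int.mod r (pat.length : Int)) 0) 0) 0)
      = [cnt [1,2,3,4,5] 0 answers, cnt [2,1,2,3,2,4,2,5] 0 answers,
         cnt [3,3,1,1,2,2,4,4,5,5] 0 answers] := by
    simp only [List.map_cons, List.map_nil]
    rw [foldl_add_map, foldl_add_map, foldl_add_map]
    simp only [PySem.Dict.getD_counter, zero_add]
    rw [score_eq [1,2,3,4,5] (by simp) (by norm_num) answers 0,
        score_eq [2,1,2,3,2,4,2,5] (by simp) (by norm_num) answers 0,
        score_eq [3,3,1,1,2,2,4,4,5,5] (by simp) (by norm_num) answers 0]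
  rw [hscores]
  exact final_eq _ _ _
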